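-- pv_equiv track=rewrite | github.com/kuangsangudu/algorithm | atcoder/atcoder beginner contest 247/E.py | process
-- ===== SOURCE A (Python) =====
-- def process(nums, X, Y):
--     i, j = 0, 0
--     mins, maxs = 0, 0
--     ret = 0
--     while i < len(nums):
--         while j < len(nums) and (mins == 0 or maxs == 0):
--             if nums[j] == X:
--                 maxs += 1
--             if nums[j] == Y:
--                 mins += 1
--             j += 1
--         if maxs and mins:
--             ret += len(nums)-j+1
--         if nums[i] == X:
--             maxs -= 1
--         if nums[i] == Y:
--             mins -= 1
--         i += 1
--     return ret
-- ===== SOURCE B (Python) =====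
-- def process(nums, X, Y):
--     # One pass over right endpoints: keep (1-based) position of the most recent
--     # X and Y; subarrays ending at r containing both = min(last_x, last_y).
--     last_x = last_y = 0
--     ret = 0
--     for r, v in enumerate(nums):
--         if v == X:
--             last_x = r + 1
--         if v == Y:
--             last_y = r + 1
--         ret += min(last_x, last_y)
--     return ret
-- ===== Notes on version B (the rewrite author's own statement) =====
-- stated objective: simpler
-- what changed: Replaced the two-pointer sliding window (nested while loops maintaining window occurrence counts of X and Y) by a single for-loop over right endpoints that keeps only the last positions of X and Y and adds min(last_x,last_y) valid left endpoints per step.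
import Mathlib
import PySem

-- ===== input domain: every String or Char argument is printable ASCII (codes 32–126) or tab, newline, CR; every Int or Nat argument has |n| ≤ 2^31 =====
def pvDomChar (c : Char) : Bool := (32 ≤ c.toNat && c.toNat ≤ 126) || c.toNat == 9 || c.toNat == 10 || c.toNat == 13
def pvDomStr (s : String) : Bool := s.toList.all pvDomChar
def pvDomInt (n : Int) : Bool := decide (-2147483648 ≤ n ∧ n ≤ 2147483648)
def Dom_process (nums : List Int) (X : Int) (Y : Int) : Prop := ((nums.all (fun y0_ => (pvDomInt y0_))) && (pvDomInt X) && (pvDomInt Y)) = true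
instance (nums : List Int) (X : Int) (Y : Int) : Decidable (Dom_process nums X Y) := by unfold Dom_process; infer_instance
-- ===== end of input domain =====

-- B replaces A's two-pointer sliding window by a one-pass scan over right endpoints
-- keeping the last occurrence positions of X and Y (objective: simpler).

-- ===== PORT A =====
-- inner `while j < len(nums) and (mins == 0 or maxs == 0): ...` loop of A
def innerA (a : List Int) (X Y : Int) (j : Nat) (mins maxs : Int) : Nat × Int × Int :=
  if h : j < a.length ∧ (mins = 0 ∨ maxs = 0) then
    innerA a X Y (j + 1)
      (if a.getD j 0 = Y then mins + 1 else mins)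
      (if a.getD j 0 = X then maxs + 1 else maxs)
  else (j, mins, maxs)
termination_by a.length - j
decreasing_by omega

-- outer `while i < len(nums): ...` loop of A
def outerA (a : List Int) (X Y : Int) (i j : Nat) (mins maxs ret : Int) : Int :=
  if _hi : i < a.length then
    match innerA a X Y j mins maxs with
    | (j', mins', maxs') =>
      let ret' := if maxs' ≠ 0 ∧ mins' ≠ 0 then ret + ((a.length : Int) - (j' : Int) + 1) else ret
      let maxs'' := if a.getD i 0 = X then maxs' - 1 else maxs'
      let mins'' := if a.getD i 0 = Y then mins' - 1 else mins'
      outerA a X Y (i + 1) j' mins'' maxs'' ret'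
  else ret
termination_by a.length - i
decreasing_by omega

def process (nums : List Int) (X : Int) (Y : Int) : Int :=
  outerA nums X Y 0 0 0 0 0

-- ===== PORT B =====
-- B's single `for r, v in enumerate(nums)` loop; lx/ly are 1-based last positions
def loopB (X Y : Int) (l : List Int) (r lx ly : Nat) (ret : Int) : Int :=
  match l with
  | [] => ret
  | v :: rest =>
    let lx' := if v = X then r + 1 else lx
    let ly' := if v = Y then r + 1 else ly
    loopB X Y rest (r + 1) lx' ly' (ret + ((min lx' ly' : Nat) : Int))

def process_alt (nums : List Int) (X : Int) (Y : Int) : Int :=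
  loopB X Y nums 0 0 0 0

-- ===== PRECONDITION & SPEC =====
def Spec_process (nums : List Int) (X : Int) (Y : Int) (out : Int) : Prop := out = process_alt nums X Y
instance (nums : List Int) (X : Int) (Y : Int) (out : Int) : Decidable (Spec_process nums X Y out) := by unfold Spec_process; infer_instance

-- ===== CLAIM (what is proved, stated in full; the proofs are below) =====
def Claim_equal_process : Prop := ∀ (nums : List Int) (X : Int) (Y : Int), Dom_process nums X Y → Spec_process nums X Y (process nums X Y)

-- ===== LEMMAS AND PROOFS =====

-- number of k ∈ [i, m) with a[k] = v
def cnt (a : List Int) (v : Int) (i m : Nat) : Nat :=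
  (List.range m).countP (fun k => decide (i ≤ k ∧ a.getD k 0 = v))

-- the subarray a[l..r] (inclusive) contains both X and Y
def validb (a : List Int) (X Y : Int) (l r : Nat) : Bool :=
  decide (cnt a X l (r + 1) ≠ 0 ∧ cnt a Y l (r + 1) ≠ 0)

-- number of valid right endpoints for left endpoint l
def gA (a : List Int) (X Y : Int) (l : Nat) : Nat :=
  (List.range a.length).countP (fun r => validb a X Y l r)

-- number of valid left endpoints for right endpoint r
def gB (a : List Int) (X Y : Int) (r : Nat) : Nat :=
  (List.range a.length).countP (fun l => validb a X Y l r)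

theorem cnt_succ (a : List Int) (v : Int) (i m : Nat) :
    cnt a v i (m + 1) = cnt a v i m + (if i ≤ m ∧ a.getD m 0 = v then 1 else 0) := by
  rw [cnt, cnt, List.range_succ, List.countP_append, List.countP_singleton]
  split_ifs with h1 h2 <;> simp_all

theorem cnt_zero_of_le (a : List Int) (v : Int) {i m : Nat} (h : m ≤ i) : cnt a v i m = 0 := by
  simp only [cnt, List.countP_eq_zero]
  intro k hk
  simp only [List.mem_range] at hk
  simp only [decide_eq_true_eq]
  omega

theorem cnt_mono_m (a : List Int) (v : Int) (i : Nat) {m m' : Nat} (h : m ≤ m') :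
    cnt a v i m ≤ cnt a v i m' := by
  induction m', h using Nat.le_induction with
  | base => exact le_refl _
  | succ m' _ ih => rw [cnt_succ]; omega

theorem cnt_left_succ (a : List Int) (v : Int) {i m : Nat} (h : i < m) :
    cnt a v i m = cnt a v (i + 1) m + (if a.getD i 0 = v then 1 else 0) := by
  induction m with
  | zero => omega
  | succ m ih =>
    rcases Nat.lt_or_ge i m with hm | hm
    · rw [cnt_succ, cnt_succ, ih hm]
      split_ifs <;> omega
    · have hi : i = m := by omega
      subst hi
      rw [cnt_succ, cnt_succ, cnt_zero_of_le a v (le_refl i), cnt_zero_of_le a v (by omega : i ≤ i + 1)]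
      split_ifs <;> omega

theorem cnt_mono_left (a : List Int) (v : Int) (i m : Nat) :
    cnt a v (i + 1) m ≤ cnt a v i m := by
  rcases Nat.lt_or_ge i m with h | h
  · rw [cnt_left_succ a v h]; omega
  · rw [cnt_zero_of_le a v h, cnt_zero_of_le a v (by omega : m ≤ i + 1)]

theorem countP_range_ge (n m : Nat) :
    (List.range n).countP (fun r => decide (m ≤ r)) = n - m := by
  induction n with
  | zero => simp
  | succ n ih =>
    rw [List.range_succ, List.countP_append, ih]
    by_cases h : m ≤ n <;> simp [h] <;> omega

theorem countP_range_lt (n m : Nat) :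
    (List.range n).countP (fun l => decide (l < m)) = min m n := by
  induction n with
  | zero => simp
  | succ n ih =>
    rw [List.range_succ, List.countP_append, ih]
    by_cases h : n < m <;> simp [h] <;> omega

theorem innerA_spec (a : List Int) (X Y : Int) (i : Nat) :
    ∀ (d j : Nat) (mins maxs : Int),
    a.length - j ≤ d → i ≤ j → j ≤ a.length →
    mins = (cnt a Y i j : Int) → maxs = (cnt a X i j : Int) →
    j ≤ (innerA a X Y j mins maxs).1 ∧ (innerA a X Y j mins maxs).1 ≤ a.length ∧
    (innerA a X Y j mins maxs).2.1 = (cnt a Y i (innerA a X Y j mins maxs).1 : Int) ∧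
    (innerA a X Y j mins maxs).2.2 = (cnt a X i (innerA a X Y j mins maxs).1 : Int) ∧
    ((innerA a X Y j mins maxs).1 = a.length ∨
      ((innerA a X Y j mins maxs).2.1 ≠ 0 ∧ (innerA a X Y j mins maxs).2.2 ≠ 0)) ∧
    (∀ m, j ≤ m → m < (innerA a X Y j mins maxs).1 → cnt a Y i m = 0 ∨ cnt a X i m = 0) := by
  intro d
  induction d with
  | zero =>
    intro j mins maxs hd hij hjn hm hx
    have hjlen : j = a.length := by omega
    rw [innerA, dif_neg (by omega)]
    refine ⟨le_refl _, hjn, hm, hx, Or.inl hjlen, fun m h1 h2 => absurd (lt_of_le_of_lt h1 h2) (lt_irrefl _)⟩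
  | succ d ih =>
    intro j mins maxs hd hij hjn hm hx
    rw [innerA]
    by_cases hg : j < a.length ∧ (mins = 0 ∨ maxs = 0)
    · rw [dif_pos hg]
      have hmY : (if a.getD j 0 = Y then mins + 1 else mins) = (cnt a Y i (j + 1) : Int) := by
        rw [cnt_succ]
        split_ifs with h1 <;> simp_all
      have hmX : (if a.getD j 0 = X then maxs + 1 else maxs) = (cnt a X i (j + 1) : Int) := by
        rw [cnt_succ]
        split_ifs with h1 <;> simp_all
      obtain ⟨h1, h2, h3, h4, h5, h6⟩ := ih (j + 1) _ _ (by omega) (by omega) (by omega) hmY hmX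
      refine ⟨by omega, h2, h3, h4, h5, ?_⟩
      intro m hm1 hm2
      rcases Nat.eq_or_lt_of_le hm1 with hjm | hjm
      · subst hjm
        rcases hg.2 with h0 | h0
        · left; rw [hm] at h0; exact_mod_cast h0
        · right; rw [hx] at h0; exact_mod_cast h0
      · exact h6 m hjm hm2
    · rw [dif_neg hg]
      refine ⟨le_refl _, hjn, hm, hx, ?_, fun m h1 h2 => absurd (lt_of_le_of_lt h1 h2) (lt_irrefl _)⟩
      by_cases hjl : j < a.length
      · rcases Decidable.em (mins = 0 ∨ maxs = 0) with hc | hc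
        · exact absurd ⟨hjl, hc⟩ hg
        · exact Or.inr ⟨fun h0 => hc (Or.inl h0), fun h0 => hc (Or.inr h0)⟩
      · exact Or.inl (by omega)

theorem cnt_ne_zero_lt (a : List Int) (v : Int) {i m : Nat} (h : cnt a v i m ≠ 0) : i < m := by
  by_contra hc
  exact h (cnt_zero_of_le a v (by omega))

theorem outerA_spec (a : List Int) (X Y : Int) :
    ∀ (d i j : Nat) (mins maxs ret : Int),
    a.length - i ≤ d →
    i ≤ j → j ≤ a.length →
    mins = (cnt a Y i j : Int) → maxs = (cnt a X i j : Int) →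
    (∀ m, m < j → cnt a Y i m = 0 ∨ cnt a X i m = 0) →
    outerA a X Y i j mins maxs ret =
      ret + ((List.range' i (a.length - i)).map (fun l => (gA a X Y l : Int))).sum := by
  intro d
  induction d with
  | zero =>
    intro i j mins maxs ret hd hij hjn hm hx hmin
    rw [outerA, dif_neg (by omega), show a.length - i = 0 by omega]
    simp
  | succ d ih =>
    intro i j mins maxs ret hd hij hjn hm hx hmin
    by_cases hi : i < a.length
    · rw [outerA, dif_pos hi]
      obtain ⟨h1, h2, h3, h4, h5, h6⟩ :=
        innerA_spec a X Y i (a.length - j) j mins maxs (le_refl _) hij hjn hm hx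
      rcases hI : innerA a X Y j mins maxs with ⟨j', mins', maxs'⟩
      rw [hI] at h1 h2 h3 h4 h5 h6
      simp only at h1 h2 h3 h4 h5 h6
      dsimp only
      have hMfull : ∀ m, m < j' → cnt a Y i m = 0 ∨ cnt a X i m = 0 := by
        intro m hmj'
        rcases Nat.lt_or_ge m j with hc | hc
        · exact hmin m hc
        · exact h6 m hc hmj'
      have hij' : i < j' := by
        rcases h5 with h5 | h5
        · omega
        · refine cnt_ne_zero_lt a X (fun hz => ?_)
          rw [hz] at h4
          simp at h4
          exact h5.2 h4
      have hgA : (if maxs' ≠ 0 ∧ mins' ≠ 0 then ret + ((a.length : Int) - (j' : Int) + 1) else ret)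
          = ret + (gA a X Y i : Int) := by
        by_cases hb : maxs' ≠ 0 ∧ mins' ≠ 0
        · have hcX : cnt a X i j' ≠ 0 := fun hz => hb.1 (by rw [hz] at h4; simpa using h4)
          have hcY : cnt a Y i j' ≠ 0 := fun hz => hb.2 (by rw [hz] at h3; simpa using h3)
          have hgAv : gA a X Y i = a.length - (j' - 1) := by
            rw [gA, List.countP_congr (q := fun r => decide (j' - 1 ≤ r))
              (fun r _ => ?_), countP_range_ge]
            simp only [validb, decide_eq_true_eq]
            constructor
            · rintro ⟨hX0, hY0⟩
              by_contra hc
              rcases hMfull (r + 1) (by omega) with h0 | h0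
              · exact hY0 h0
              · exact hX0 h0
            · intro hle
              have hj'r : j' ≤ r + 1 := by omega
              exact ⟨fun hz => hcX (by have := cnt_mono_m a X i hj'r; omega),
                     fun hz => hcY (by have := cnt_mono_m a Y i hj'r; omega)⟩
          rw [if_pos hb, hgAv]
          have hc : ((a.length - (j' - 1) : Nat) : Int) = (a.length : Int) - (j' : Int) + 1 := by
            omega
          rw [hc]
        · have hj'n : j' = a.length := by
            rcases h5 with h | h
            · exact h
            · exact absurd ⟨h.2, h.1⟩ hb
          have h0 : cnt a Y i a.length = 0 ∨ cnt a X i a.length = 0 := by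
            by_cases hY0 : mins' = 0
            · left
              rw [hY0] at h3
              rw [← hj'n]
              exact_mod_cast h3.symm
            · right
              have hX0 : maxs' = 0 := by
                by_contra hX0
                exact hb ⟨hX0, hY0⟩
              rw [hX0] at h4
              rw [← hj'n]
              exact_mod_cast h4.symm
          have hgA0 : gA a X Y i = 0 := by
            rw [gA, List.countP_eq_zero]
            intro r hr
            simp only [List.mem_range] at hr
            simp only [validb, decide_eq_true_eq]
            rintro ⟨hX0, hY0⟩
            rcases h0 with h0 | h0
            · exact hY0 (by have := cnt_mono_m a Y i (show r + 1 ≤ a.length by omega); omega)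
            · exact hX0 (by have := cnt_mono_m a X i (show r + 1 ≤ a.length by omega); omega)
          rw [if_neg hb, hgA0]
          simp
      have hY' : (if a.getD i 0 = Y then mins' - 1 else mins') = (cnt a Y (i + 1) j' : Int) := by
        by_cases h : a.getD i 0 = Y
        · rw [if_pos h, h3, cnt_left_succ a Y hij', if_pos h]
          push_cast
          ring
        · rw [if_neg h, h3, cnt_left_succ a Y hij', if_neg h]
          push_cast
          ring
      have hX' : (if a.getD i 0 = X then maxs' - 1 else maxs') = (cnt a X (i + 1) j' : Int) := by
        by_cases h : a.getD i 0 = X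
        · rw [if_pos h, h4, cnt_left_succ a X hij', if_pos h]
          push_cast
          ring
        · rw [if_neg h, h4, cnt_left_succ a X hij', if_neg h]
          push_cast
          ring
      have hmin' : ∀ m, m < j' → cnt a Y (i + 1) m = 0 ∨ cnt a X (i + 1) m = 0 := by
        intro m hm'
        rcases hMfull m hm' with h0 | h0
        · left
          have := cnt_mono_left a Y i m
          omega
        · right
          have := cnt_mono_left a X i m
          omega
      rw [ih (i + 1) j' _ _ _ (by omega) (by omega) h2 hY' hX' hmin']
      rw [show a.length - i = (a.length - (i + 1)) + 1 by omega, List.range'_succ]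
      simp only [List.map_cons, List.sum_cons]
      rw [hgA]
      ring
    · rw [outerA, dif_neg hi, show a.length - i = 0 by omega]
      simp

theorem loopB_spec (a : List Int) (X Y : Int) :
    ∀ (rest : List Int) (r lx ly : Nat) (ret : Int),
    rest = a.drop r → r ≤ a.length → lx ≤ r → ly ≤ r →
    (∀ l, cnt a X l r ≠ 0 ↔ l < lx) → (∀ l, cnt a Y l r ≠ 0 ↔ l < ly) →
    loopB X Y rest r lx ly ret =
      ret + ((List.range' r (a.length - r)).map (fun r' => (gB a X Y r' : Int))).sum := by
  intro rest
  induction rest with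
  | nil =>
    intro r lx ly ret hdrop hr _ _ _ _
    have hlen : a.length ≤ r := by
      have := congrArg List.length hdrop
      simp at this
      omega
    rw [loopB, show a.length - r = 0 by omega]
    simp
  | cons v rest' ih =>
    intro r lx ly ret hdrop hr hlx hly hX hY
    have hlen : rest'.length + 1 = a.length - r := by
      have := congrArg List.length hdrop
      simpa using this
    have hrlt : r < a.length := by omega
    have hv : a.getD r 0 = v := by
      have h0 : (a.drop r)[0]? = a[r + 0]? := List.getElem?_drop
      rw [← hdrop] at h0
      simp at h0
      rw [List.getD_eq_getElem?_getD, ← h0]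
      rfl
    have hrest : rest' = a.drop (r + 1) := by
      have : List.drop 1 (List.drop r a) = List.drop (r + 1) a := List.drop_drop
      rw [← hdrop] at this
      simpa using this
    rw [loopB]
    -- new last-occurrence invariants at r + 1
    have hX' : ∀ l, cnt a X l (r + 1) ≠ 0 ↔ l < (if v = X then r + 1 else lx) := by
      intro l
      by_cases h : v = X
      · rw [if_pos h, cnt_succ, hv, h]
        by_cases hc : l ≤ r
        · rw [if_pos (⟨hc, rfl⟩ : l ≤ r ∧ X = X)]
          omega
        · rw [if_neg (fun hh => hc hh.1), cnt_zero_of_le a X (by omega : r ≤ l)]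
          omega
      · rw [if_neg h, cnt_succ, hv, if_neg (fun hh => h hh.2)]
        simpa using hX l
    have hY' : ∀ l, cnt a Y l (r + 1) ≠ 0 ↔ l < (if v = Y then r + 1 else ly) := by
      intro l
      by_cases h : v = Y
      · rw [if_pos h, cnt_succ, hv, h]
        by_cases hc : l ≤ r
        · rw [if_pos (⟨hc, rfl⟩ : l ≤ r ∧ Y = Y)]
          omega
        · rw [if_neg (fun hh => hc hh.1), cnt_zero_of_le a Y (by omega : r ≤ l)]
          omega
      · rw [if_neg h, cnt_succ, hv, if_neg (fun hh => h hh.2)]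
        simpa using hY l
    have hstep : (min (if v = X then r + 1 else lx) (if v = Y then r + 1 else ly) : Nat)
        = gB a X Y r := by
      rw [gB, List.countP_congr
        (q := fun l => decide (l < min (if v = X then r + 1 else lx) (if v = Y then r + 1 else ly)))
        (fun l _ => ?_), countP_range_lt]
      · have h1 : (if v = X then r + 1 else lx) ≤ r + 1 := by split_ifs <;> omega
        have h2 : (if v = Y then r + 1 else ly) ≤ r + 1 := by split_ifs <;> omega
        omega
      · simp only [validb, decide_eq_true_eq]
        rw [hX' l, hY' l]
        omega
    rw [ih (r + 1) _ _ _ hrest (by omega) (by split_ifs <;> omega) (by split_ifs <;> omega) hX' hY']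
    rw [show a.length - r = (a.length - (r + 1)) + 1 by omega, List.range'_succ]
    simp only [List.map_cons, List.sum_cons]
    rw [← hstep]
    push_cast
    ring

theorem sum_map_range {M : Type} [AddCommMonoid M] (n : Nat) (f : Nat → M) :
    ((List.range n).map f).sum = ∑ k ∈ Finset.range n, f k := by
  induction n with
  | zero => simp
  | succ n ih => rw [List.range_succ, Finset.sum_range_succ, List.map_append, List.sum_append, ih]; simp

theorem countP_range_eq_sum (n : Nat) (p : Nat → Bool) :
    (List.range n).countP p = ∑ k ∈ Finset.range n, (if p k then 1 else 0) := by
  induction n with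
  | zero => simp
  | succ n ih => rw [List.range_succ, List.countP_append, Finset.sum_range_succ, ih, List.countP_singleton]

theorem sum_gA_eq_sum_gB (a : List Int) (X Y : Int) :
    ((List.range a.length).map (fun l => (gA a X Y l : Int))).sum =
    ((List.range a.length).map (fun r => (gB a X Y r : Int))).sum := by
  rw [sum_map_range, sum_map_range]
  calc ∑ l ∈ Finset.range a.length, ((gA a X Y l : Nat) : Int)
      = ∑ l ∈ Finset.range a.length, ∑ r ∈ Finset.range a.length,
          ((if validb a X Y l r then 1 else 0 : Nat) : Int) := by
        refine Finset.sum_congr rfl fun l _ => ?_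
        rw [gA, countP_range_eq_sum]
        push_cast
        rfl
    _ = ∑ r ∈ Finset.range a.length, ∑ l ∈ Finset.range a.length,
          ((if validb a X Y l r then 1 else 0 : Nat) : Int) := Finset.sum_comm
    _ = ∑ r ∈ Finset.range a.length, ((gB a X Y r : Nat) : Int) := by
        refine Finset.sum_congr rfl fun r _ => ?_
        rw [gB, countP_range_eq_sum]
        push_cast
        rfl

-- ===== VERDICT (by name: the statement is the Claim_ definition above) =====
theorem process_spec : Claim_equal_process := by
  intro nums X Y _
  show process nums X Y = process_alt nums X Y
  have hA := outerA_spec nums X Y nums.length 0 0 0 0 0 (by omega) (le_refl 0) (Nat.zero_le _)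
    (by simp [cnt_zero_of_le]) (by simp [cnt_zero_of_le]) (by omega)
  have hB := loopB_spec nums X Y nums 0 0 0 0 rfl (Nat.zero_le _) (le_refl 0) (le_refl 0)
    (by intro l; simp [cnt_zero_of_le]) (by intro l; simp [cnt_zero_of_le])
  rw [process, hA, process_alt, hB]
  simp only [Nat.sub_zero, zero_add]
  rw [← List.range_eq_range', sum_gA_eq_sum_gB]
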